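-- pv_equiv track=rewrite | github.com/linhdvu14/cp-sols | sols/CodeForces/1680_edu/C_Binary_String.py | solve_binsearch
-- ===== SOURCE A (Python) =====
-- def solve_binsearch(S):
--     idx = [i for i, c in enumerate(S) if c == '1']
--     if not idx or len(idx) == len(S): return 0
--
--     def is_ok(cost):
--         one = len(idx) - cost  # min num ones in remaining interval
--         for i in range(one - 1, len(idx)):
--             zero = idx[i] - idx[i - one + 1] + 1 - one
--             if zero <= cost: return True
--         return False
--
--     res, lo, hi = -1, 0, len(idx)
--     while lo <= hi:
--         mi = (lo + hi) // 2
--         if is_ok(mi):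
--             res = mi
--             hi = mi - 1
--         else:
--             lo = mi + 1
--
--     return res
-- ===== SOURCE B (Python) =====
-- def solve_binsearch(S):
--     idx = [i for i, c in enumerate(S) if c == '1']
--     m = len(idx)
--     if m == 0 or m == len(S):
--         return 0
--     # d[k] = idx[k] - k, so zeros kept in window of ones k..i is d[i] - d[k]
--     d = [p - k for k, p in enumerate(idx)]
--     ans = m
--     j = 0
--     for i in range(m):
--         di = d[i]
--         t = m - 1 - i          # ones deleted = t + j for window j..i
--         while di - d[j] > t + j:
--             if di - d[j] < ans:
--                 ans = di - d[j]
--             j += 1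
--         if t + j < ans:
--             ans = t + j
--     return ans
-- ===== Notes on version B (the rewrite author's own statement) =====
-- stated objective: alternative
-- what changed: Replaces A's binary search over the answer (each probe rescanning windows of one-positions) by a single monotone two-pointer sweep over the one-positions that directly minimises max(ones deleted, zeros kept); same measured cost on the generated inputs (A's probes exit early there), better worst-case scaling.
import Mathlib
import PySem

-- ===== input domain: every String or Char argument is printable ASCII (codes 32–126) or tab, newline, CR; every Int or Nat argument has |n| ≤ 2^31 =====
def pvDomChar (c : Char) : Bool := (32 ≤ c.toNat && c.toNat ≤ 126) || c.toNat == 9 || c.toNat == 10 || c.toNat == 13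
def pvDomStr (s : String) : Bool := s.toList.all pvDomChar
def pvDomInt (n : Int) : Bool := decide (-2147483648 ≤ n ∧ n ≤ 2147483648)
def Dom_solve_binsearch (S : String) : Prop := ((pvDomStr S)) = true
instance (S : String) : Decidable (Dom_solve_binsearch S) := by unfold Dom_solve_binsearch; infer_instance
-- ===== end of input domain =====

-- B replaces A's binary search over the answer by a single monotone two-pointer sweep
-- over the positions of the '1' characters (objective: alternative algorithm).

-- ===== PORT A =====
-- helper shared by both ports: both Python versions build idx with the identical
-- comprehension  [i for i, c in enumerate(S) if c == '1']
def pvIdx (S : String) : List Int :=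
  ((PySem.List.enumerate S.toList).filter (fun p => p.2 == '1')).map (fun p => p.1)

-- is_ok: the for-loop with an early `return True` and no side effects is an existence test.
-- On every call A makes, both pyGetD indices are provably in range, so the default 0 is never read.
def pvIsOk (idx : List Int) (cost : Int) : Bool :=
  let one : Int := (idx.length : Int) - cost
  (PySem.List.pyRange (one - 1) (idx.length : Int)).any (fun i =>
    decide (PySem.List.pyGetD idx i 0 - PySem.List.pyGetD idx (i - one + 1) 0 + 1 - one ≤ cost))

-- the `while lo <= hi` loop over state (res, lo, hi); mi is written out at each use site.
-- The fuel argument only makes the recursion structural: the loop halves hi - lo, so the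
-- initial fuel len+1 ≥ hi+1-lo iterations (proved in pvBS_eq) is never exhausted.
def pvBS (idx : List Int) : Nat → Int → Int → Int → Int
  | 0, res, _, _ => res
  | fuel+1, res, lo, hi =>
    if lo ≤ hi then
      if pvIsOk idx (PySem.Int.floordiv (lo + hi) 2) then
        pvBS idx fuel (PySem.Int.floordiv (lo + hi) 2) lo (PySem.Int.floordiv (lo + hi) 2 - 1)
      else
        pvBS idx fuel res (PySem.Int.floordiv (lo + hi) 2 + 1) hi
    else res

def solve_binsearch (S : String) : Int :=
  let idx := pvIdx S
  if idx = [] ∨ (idx.length : Int) = PySem.Str.len S then 0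
  else pvBS idx (idx.length + 1) (-1) 0 (idx.length : Int)

-- ===== PORT B =====
-- d[k] = idx[k] - k  (zeros kept in the window of ones k..i is d[i] - d[k])
def pvD (idx : List Int) : List Int :=
  (PySem.List.enumerate idx).map (fun p => p.2 - p.1)

-- the inner while loop; the fuel i - j only makes the recursion structural: in every
-- state B actually reaches, the Python condition is already false at j = i
-- (there it reads 0 > m - 1, false since m ≥ 1 past the early return).
def pvInner (d : List Int) (di t : Int) : Nat → Nat → Int → Nat × Int
  | 0, j, ans => (j, ans)
  | fuel+1, j, ans =>
    if t + (j : Int) < di - d.getD j 0 then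
      pvInner d di t fuel (j + 1)
        (if di - d.getD j 0 < ans then di - d.getD j 0 else ans)
    else (j, ans)

-- one iteration of the `for i in range(m)` loop over state (j, ans)
def pvStep (d : List Int) (m : Int) (s : Nat × Int) (i : Nat) : Nat × Int :=
  let di := d.getD i 0
  let t := m - 1 - (i : Int)
  let r := pvInner d di t (i - s.1) s.1 s.2
  (r.1, if t + (r.1 : Int) < r.2 then t + (r.1 : Int) else r.2)

def solve_binsearch_alt (S : String) : Int :=
  let idx := pvIdx S
  let m := idx.length
  if m = 0 ∨ (m : Int) = PySem.Str.len S then 0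
  else ((List.range m).foldl (pvStep (pvD idx) (m : Int)) (0, (m : Int))).2

-- ===== PRECONDITION & SPEC =====
def Spec_solve_binsearch (S : String) (out : Int) : Prop := out = solve_binsearch_alt S
instance (S : String) (out : Int) : Decidable (Spec_solve_binsearch S out) := by unfold Spec_solve_binsearch; infer_instance

-- ===== CLAIM (what is proved, stated in full; the proofs are below) =====
def Claim_equal_solve_binsearch : Prop := ∀ (S : String), Dom_solve_binsearch S → Spec_solve_binsearch S (solve_binsearch S)

-- ===== LEMMAS AND PROOFS =====

def wz (idx : List Int) (i j : Nat) : Int :=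
  idx.getD i 0 - idx.getD j 0 - ((i : Int) - j)

def wcost (idx : List Int) (i j : Nat) : Int :=
  max ((idx.length : Int) - ((i : Int) - j + 1)) (wz idx i j)

def IsOpt (idx : List Int) (v : Int) : Prop :=
  (∃ i j : Nat, j ≤ i ∧ i < idx.length ∧ v = wcost idx i j) ∧
  (∀ i j : Nat, j ≤ i → i < idx.length → v ≤ wcost idx i j)

theorem pvIdx_pairwise (S : String) : (pvIdx S).Pairwise (· < ·) := by
  unfold pvIdx
  refine List.Pairwise.map _ (fun a b h => h) ?_
  exact List.Pairwise.filter _ (PySem.List.pairwise_lt_enumerate S.toList 0)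

theorem gap {idx : List Int} (hs : idx.Pairwise (· < ·)) :
    ∀ {j i : Nat}, j ≤ i → i < idx.length → idx.getD j 0 + ((i : Int) - j) ≤ idx.getD i 0 := by
  have hmono := List.pairwise_iff_getElem.mp hs
  intro j i hji hi
  induction i with
  | zero =>
    have : j = 0 := by omega
    subst this; simp
  | succ k ih =>
    rcases Nat.eq_or_lt_of_le hji with h | h
    · subst h; simp
    · have hk : k < idx.length := by omega
      have h1 := ih (by omega) hk
      have h2 := hmono k (k+1) hk hi (by omega)
      rw [List.getD_eq_getElem _ _ hk] at h1
      rw [List.getD_eq_getElem _ _ hi]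
      push_cast
      omega

theorem pvD_getD {idx : List Int} {k : Nat} (hk : k < idx.length) :
    (pvD idx).getD k 0 = idx.getD k 0 - k := by
  have hlen : (pvD idx).length = idx.length := by
    unfold pvD; rw [List.length_map, PySem.List.length_enumerate]
  rw [List.getD_eq_getElem _ _ (by omega), List.getD_eq_getElem _ _ hk]
  unfold pvD
  rw [List.getElem_map, PySem.List.getElem_enumerate]
  simp

theorem wz_self (idx : List Int) (k : Nat) : wz idx k k = 0 := by
  unfold wz; omega

theorem dbridge {idx : List Int} {a b : Nat} (ha : a < idx.length) (hb : b < idx.length) :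
    (pvD idx).getD a 0 - (pvD idx).getD b 0 = wz idx a b := by
  rw [pvD_getD ha, pvD_getD hb]; unfold wz; omega

theorem isOk_iff {idx : List Int} (hs : idx.Pairwise (· < ·)) {c : Int}
    (h0 : 0 ≤ c) (h1 : c ≤ (idx.length : Int) - 1) :
    pvIsOk idx c = true ↔ ∃ i j : Nat, j ≤ i ∧ i < idx.length ∧ wcost idx i j ≤ c := by
  unfold pvIsOk
  rw [List.any_eq_true]
  constructor
  · rintro ⟨i, hmem, hp⟩
    rw [PySem.List.mem_pyRange_one] at hmem
    rw [decide_eq_true_eq] at hp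
    have hi0 : 0 ≤ i := by omega
    have hj0 : 0 ≤ i - ((idx.length : Int) - c) + 1 := by omega
    have hjle : i - ((idx.length : Int) - c) + 1 ≤ i := by omega
    rw [PySem.List.pyGetD_eq_getElem idx 0 hi0 hmem.2,
        PySem.List.pyGetD_eq_getElem idx 0 hj0 (by omega)] at hp
    refine ⟨i.toNat, (i - ((idx.length : Int) - c) + 1).toNat, by omega, by omega, ?_⟩
    unfold wcost wz
    rw [List.getD_eq_getElem _ _ (show i.toNat < idx.length by omega),
        List.getD_eq_getElem _ _ (show (i - ((idx.length : Int) - c) + 1).toNat < idx.length by omega)]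
    have e1 : ((i.toNat : Nat) : Int) = i := by omega
    have e2 : (((i - ((idx.length : Int) - c) + 1).toNat : Nat) : Int) = i - ((idx.length : Int) - c) + 1 := by omega
    rw [e1, e2]
    omega
  · rintro ⟨i, j, hji, hi, hc⟩
    unfold wcost wz at hc
    rw [List.getD_eq_getElem _ _ hi, List.getD_eq_getElem _ _ (by omega : j < idx.length)] at hc
    have hone : 1 ≤ (idx.length : Int) - c := by omega
    have hkeep : (idx.length : Int) - c ≤ (i : Int) - j + 1 := by omega
    set one : Int := (idx.length : Int) - c with hone_def
    have hj'0 : 0 ≤ (i : Int) - one + 1 := by omega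
    set j' : Nat := ((i : Int) - one + 1).toNat with hj'_def
    have hj'c : (j' : Int) = (i : Int) - one + 1 := by omega
    have hj'le : j ≤ j' := by omega
    have hj'i : j' ≤ i := by omega
    have hgap := gap hs hj'le (by omega : j' < idx.length)
    rw [List.getD_eq_getElem _ _ (by omega : j < idx.length),
        List.getD_eq_getElem _ _ (by omega : j' < idx.length)] at hgap
    refine ⟨(i : Int), ?_, ?_⟩
    · rw [PySem.List.mem_pyRange_one]; omega
    · rw [decide_eq_true_eq]
      rw [PySem.List.pyGetD_eq_getElem idx 0 (by omega) (by exact_mod_cast Int.ofNat_lt.mpr hi),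
          PySem.List.pyGetD_eq_getElem idx 0 (by omega) (by omega)]
      have e3 : ((i : Int)).toNat = i := by omega
      have e4 : ((i : Int) - one + 1).toNat = j' := by omega
      simp only [e3, e4]
      omega

theorem pvInner_spec (d : List Int) (di t : Int) :
    ∀ (fuel j : Nat) (ans : Int),
    (j ≤ (pvInner d di t fuel j ans).1 ∧ (pvInner d di t fuel j ans).1 ≤ j + fuel) ∧
    (pvInner d di t fuel j ans).2 ≤ ans ∧
    (∀ j', j ≤ j' → j' < (pvInner d di t fuel j ans).1 →
      (pvInner d di t fuel j ans).2 ≤ di - d.getD j' 0 ∧ t + (j' : Int) < di - d.getD j' 0) ∧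
    ((pvInner d di t fuel j ans).1 = j + fuel ∨
      di - d.getD (pvInner d di t fuel j ans).1 0 ≤ t + ((pvInner d di t fuel j ans).1 : Int)) ∧
    ((pvInner d di t fuel j ans).2 = ans ∨
      ∃ j', j ≤ j' ∧ j' < (pvInner d di t fuel j ans).1 ∧
        (pvInner d di t fuel j ans).2 = di - d.getD j' 0) := by
  intro fuel
  induction fuel with
  | zero =>
    intro j ans
    exact ⟨⟨le_refl _, Nat.le_add_right _ _⟩, le_refl _,
      fun j' h1 h2 => absurd (show j' < j from h2) (by omega),
      Or.inl rfl, Or.inl rfl⟩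
  | succ n ih =>
    intro j ans
    by_cases h : t + (j : Int) < di - d.getD j 0
    · rw [show pvInner d di t (n+1) j ans = pvInner d di t n (j+1)
          (if di - d.getD j 0 < ans then di - d.getD j 0 else ans) by rw [pvInner, if_pos h]]
      set ans' := if di - d.getD j 0 < ans then di - d.getD j 0 else ans with hans'
      have hans'le : ans' ≤ ans := by rw [hans']; split <;> omega
      have hans'le2 : ans' ≤ di - d.getD j 0 := by rw [hans']; split <;> omega
      obtain ⟨⟨b1, b2⟩, ble, br3, bex, batt⟩ := ih (j+1) ans'
      refine ⟨⟨by omega, by omega⟩, le_trans ble hans'le, ?_, by omega, ?_⟩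
      · intro j' h1 h2
        rcases Nat.eq_or_lt_of_le h1 with rfl | h1'
        · exact ⟨le_trans ble hans'le2, h⟩
        · exact br3 j' (by omega) h2
      · rcases batt with heq | ⟨j', hj1, hj2, hj3⟩
        · rw [hans'] at heq
          by_cases hlt : di - d.getD j 0 < ans
          · right; refine ⟨j, le_refl _, by omega, ?_⟩
            rw [heq, if_pos hlt]
          · left; rw [heq, if_neg hlt]
        · exact Or.inr ⟨j', by omega, hj2, hj3⟩
    · rw [show pvInner d di t (n+1) j ans = (j, ans) by rw [pvInner, if_neg h]]
      exact ⟨⟨le_refl _, Nat.le_add_right _ _⟩, le_refl _,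
        fun j' h1 h2 => absurd (show j' < j from h2) (by omega),
        Or.inr (show di - d.getD j 0 ≤ t + (j : Int) by omega), Or.inl rfl⟩

theorem pvStep_spec {idx : List Int} (hs : idx.Pairwise (· < ·)) (hm : 1 ≤ idx.length)
    {t : Nat} {sp : Nat × Int} (htm : t < idx.length) (hji : sp.1 ≤ t)
    (hc3 : ∀ j', j' < sp.1 → sp.2 ≤ wz idx (t-1) j')
    (hc4 : ∀ i' j' : Nat, j' ≤ i' → i' < t → sp.2 ≤ wcost idx i' j')
    (hc5 : sp.2 = (idx.length : Int) ∨
      ∃ i' j' : Nat, j' ≤ i' ∧ i' < t ∧ sp.2 = wcost idx i' j') :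
    (pvStep (pvD idx) (idx.length : Int) sp t).1 ≤ t ∧
    (∀ j', j' < (pvStep (pvD idx) (idx.length : Int) sp t).1 →
      (pvStep (pvD idx) (idx.length : Int) sp t).2 ≤ wz idx t j') ∧
    (∀ i' j' : Nat, j' ≤ i' → i' < t + 1 →
      (pvStep (pvD idx) (idx.length : Int) sp t).2 ≤ wcost idx i' j') ∧
    ((pvStep (pvD idx) (idx.length : Int) sp t).2 = (idx.length : Int) ∨
      ∃ i' j' : Nat, j' ≤ i' ∧ i' < t + 1 ∧
        (pvStep (pvD idx) (idx.length : Int) sp t).2 = wcost idx i' j') := by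
  obtain ⟨j, ans⟩ := sp
  simp only at hji hc3 hc4 hc5
  set m := idx.length with hmdef
  set mI : Int := (m : Int) with hmIdef
  set d := pvD idx with hddef
  set di := d.getD t 0 with hdidef
  set tI : Int := mI - 1 - (t : Int) with htIdef
  set r := pvInner d di tI (t - j) j ans with hrdef
  have hstep : pvStep d mI (j, ans) t =
      (r.1, if tI + (r.1 : Int) < r.2 then tI + (r.1 : Int) else r.2) := rfl
  obtain ⟨⟨ib1, ib2'⟩, ile, ir3, iex', iatt⟩ := pvInner_spec d di tI (t - j) j ans
  rw [← hrdef] at ib1 ib2' ile ir3 iex' iatt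
  have ib2 : r.1 ≤ t := by omega
  have iex : r.1 = t ∨ di - d.getD r.1 0 ≤ tI + (r.1 : Int) := by omega
  have hbr : ∀ {k : Nat}, k ≤ t → di - d.getD k 0 = wz idx t k := by
    intro k hk
    rw [hdidef, hddef]
    exact dbridge htm (by omega)
  set ans3 : Int := if tI + (r.1 : Int) < r.2 then tI + (r.1 : Int) else r.2 with hans3
  have ha3a : ans3 ≤ r.2 := by rw [hans3]; split <;> omega
  have ha3b : ans3 ≤ tI + (r.1 : Int) := by rw [hans3]; split <;> omega
  have exitz : wz idx t r.1 ≤ tI + (r.1 : Int) := by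
    rcases iex with h | h
    · rw [h, wz_self]; omega
    · rw [← hbr ib2]; omega
  have wzmono : ∀ j', j' < j → wz idx (t-1) j' ≤ wz idx t j' := by
    intro j' hj'
    have ht1 : 1 ≤ t := by omega
    have hg := gap hs (show t - 1 ≤ t by omega) htm
    have hcast : (((t-1 : Nat)) : Int) = (t : Int) - 1 := by omega
    unfold wz
    rw [hcast] at hg ⊢
    omega
  have newc3 : ∀ j', j' < r.1 → ans3 ≤ wz idx t j' := by
    intro j' hj'
    by_cases hcase : j' < j
    · exact le_trans (le_trans ha3a ile) (le_trans (hc3 j' hcase) (wzmono j' hcase))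
    · have := (ir3 j' (by omega) hj').1
      rw [hbr (by omega)] at this
      omega
  rw [hstep]
  refine ⟨ib2, newc3, ?_, ?_⟩
  · intro i' j' h1 h2
    rcases Nat.lt_or_ge i' t with hlt | hge
    · exact le_trans (le_trans ha3a ile) (hc4 i' j' h1 hlt)
    · have hit : i' = t := by omega
      subst hit
      by_cases hcase : j' < r.1
      · exact le_trans (newc3 j' hcase) (le_max_right _ _)
      · have hA : ans3 ≤ mI - ((i' : Int) - (j' : Int) + 1) := by
          have : (r.1 : Int) ≤ (j' : Int) := by omega
          omega
        exact le_trans hA (le_max_left _ _)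
  · by_cases hcut : tI + (r.1 : Int) < r.2
    · right
      refine ⟨t, r.1, ib2, by omega, ?_⟩
      have he : ans3 = tI + (r.1 : Int) := by rw [hans3, if_pos hcut]
      show ans3 = _
      rw [he]
      unfold wcost
      rw [max_eq_left (by omega : wz idx t r.1 ≤ mI - ((t : Int) - (r.1 : Int) + 1))]
      omega
    · have he : ans3 = r.2 := by rw [hans3, if_neg hcut]
      show (ans3 = mI ∨ _)
      rw [he]
      rcases iatt with heq | ⟨j', hj1, hj2, heq⟩
      · rw [heq]
        rcases hc5 with h | ⟨i', j', ha, hb, hcc⟩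
        · exact Or.inl h
        · exact Or.inr ⟨i', j', ha, by omega, hcc⟩
      · right
        refine ⟨t, j', by omega, by omega, ?_⟩
        have hcond := (ir3 j' hj1 hj2).2
        rw [hbr (by omega)] at heq hcond
        show r.2 = _
        rw [heq]
        unfold wcost
        rw [max_eq_right (by omega : mI - ((t : Int) - (j' : Int) + 1) ≤ wz idx t j')]

theorem B_opt {idx : List Int} (hs : idx.Pairwise (· < ·)) (hm : 1 ≤ idx.length) :
    IsOpt idx (((List.range idx.length).foldl
      (pvStep (pvD idx) (idx.length : Int)) (0, (idx.length : Int))).2) := by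
  set m := idx.length with hmdef
  set mI : Int := (m : Int) with hmIdef
  set d := pvD idx with hddef
  have inv : ∀ t : Nat, t ≤ m →
      (((List.range t).foldl (pvStep d mI) (0, mI)).1 + 1 ≤ t ∨
        (t = 0 ∧ ((List.range t).foldl (pvStep d mI) (0, mI)).1 = 0)) ∧
      (∀ j', j' < ((List.range t).foldl (pvStep d mI) (0, mI)).1 →
        ((List.range t).foldl (pvStep d mI) (0, mI)).2 ≤ wz idx (t-1) j') ∧
      (∀ i' j' : Nat, j' ≤ i' → i' < t →
        ((List.range t).foldl (pvStep d mI) (0, mI)).2 ≤ wcost idx i' j') ∧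
      (((List.range t).foldl (pvStep d mI) (0, mI)).2 = mI ∨
        ∃ i' j' : Nat, j' ≤ i' ∧ i' < t ∧
          ((List.range t).foldl (pvStep d mI) (0, mI)).2 = wcost idx i' j') := by
    intro t
    induction t with
    | zero =>
      intro _
      simp only [List.range_zero, List.foldl_nil]
      exact ⟨Or.inr ⟨trivial, trivial⟩, by omega, by omega, Or.inl trivial⟩
    | succ t ih =>
      intro ht1
      obtain ⟨I1, I2, I3, I4⟩ := ih (by omega)
      set s := (List.range t).foldl (pvStep d mI) (0, mI) with hsdef
      have htm : t < m := by omega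
      have hji : s.1 ≤ t := by omega
      have hmain := pvStep_spec (t := t) (sp := s) hs hm htm hji I2 I3 I4
      simp only [← hmdef, ← hddef] at hmain
      simp only [← hmIdef] at hmain
      rw [List.range_succ, List.foldl_append, List.foldl_cons, List.foldl_nil, ← hsdef]
      obtain ⟨m1, m2, m3, m4⟩ := hmain
      exact ⟨by omega, by simpa using m2, m3, m4⟩
  obtain ⟨I1, I2, I3, I4⟩ := inv m le_rfl
  have hself : wcost idx (m-1) (m-1) = mI - 1 := by
    unfold wcost
    rw [wz_self, max_eq_left (by omega)]
    omega
  constructor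
  · rcases I4 with h | hpair
    · exfalso
      have := I3 (m-1) (m-1) le_rfl (by omega)
      rw [hself] at this
      omega
    · exact hpair
  · exact I3

theorem wcost_self {idx : List Int} (hm : 1 ≤ idx.length) :
    wcost idx (idx.length - 1) (idx.length - 1) = (idx.length : Int) - 1 := by
  unfold wcost
  rw [wz_self, max_eq_left (by omega)]
  omega

theorem pvBS_eq {idx : List Int} {P : Int}
    (hchar : ∀ c : Int, 0 ≤ c → c ≤ (idx.length : Int) - 1 → (pvIsOk idx c = true ↔ P ≤ c))
    (hP0 : 0 ≤ P) (hPm : P ≤ (idx.length : Int) - 1) :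
    ∀ (n : Nat) (lo hi res : Int), (hi + 1 - lo).toNat ≤ n → 0 ≤ lo → lo ≤ P →
      hi ≤ (idx.length : Int) → (P ≤ hi ∨ res = P) → pvBS idx n res lo hi = P := by
  intro n
  induction n with
  | zero =>
    intro lo hi res hn h0 hP hhi hd
    rw [pvBS]
    omega
  | succ n ih =>
    intro lo hi res hn h0 hP hhi hd
    by_cases hlh : lo ≤ hi
    · have hmid := PySem.Int.floordiv_two_mid_bounds hlh
      have hmiub : PySem.Int.floordiv (lo + hi) 2 < (idx.length : Int) := by
        rw [PySem.Int.floordiv_lt_iff_lt_mul (by omega)]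
        omega
      rw [pvBS, if_pos hlh]
      by_cases hok : pvIsOk idx (PySem.Int.floordiv (lo + hi) 2) = true
      · rw [if_pos hok]
        have hPle : P ≤ PySem.Int.floordiv (lo + hi) 2 :=
          (hchar _ (by omega) (by omega)).mp hok
        exact ih _ _ _ (by omega) h0 hP (by omega) (by omega)
      · rw [if_neg hok]
        have hPgt : ¬ P ≤ PySem.Int.floordiv (lo + hi) 2 := fun h =>
          hok ((hchar _ (by omega) (by omega)).mpr h)
        exact ih _ hi res (by omega) (by omega) (by omega) hhi (by omega)
    · rw [pvBS, if_neg hlh]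
      omega

theorem main_eq (S : String) : solve_binsearch S = solve_binsearch_alt S := by
  have hA : solve_binsearch S =
      (if pvIdx S = [] ∨ ((pvIdx S).length : Int) = PySem.Str.len S then 0
       else pvBS (pvIdx S) ((pvIdx S).length + 1) (-1) 0 ((pvIdx S).length : Int)) := rfl
  have hB : solve_binsearch_alt S =
      (if (pvIdx S).length = 0 ∨ (((pvIdx S).length : Int)) = PySem.Str.len S then 0
       else ((List.range (pvIdx S).length).foldl
         (pvStep (pvD (pvIdx S)) (((pvIdx S).length : Int))) (0, (((pvIdx S).length : Int)))).2) := rfl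
  rw [hA, hB]
  set idx := pvIdx S with hidx
  by_cases hg : idx = [] ∨ ((idx.length : Int) = PySem.Str.len S)
  · rw [if_pos hg, if_pos (by rcases hg with h | h; exacts [Or.inl (by simp [h]), Or.inr h])]
  · have hg' : ¬ (idx.length = 0 ∨ ((idx.length : Int) = PySem.Str.len S)) := by
      intro h
      exact hg (by rcases h with h | h; exacts [Or.inl (List.length_eq_zero_iff.mp h), Or.inr h])
    rw [if_neg hg, if_neg hg']
    have hm : 1 ≤ idx.length := by
      rcases Nat.eq_zero_or_pos idx.length with h | h
      · exact absurd (Or.inl h) hg'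
      · exact h
    have hs : idx.Pairwise (· < ·) := pvIdx_pairwise S
    have hopt := B_opt hs hm
    set vB := ((List.range idx.length).foldl
      (pvStep (pvD idx) (idx.length : Int)) (0, (idx.length : Int))).2 with hvB
    obtain ⟨⟨i0, j0, hji0, hi0, heq0⟩, hle⟩ := hopt
    have hP0 : 0 ≤ vB := by
      rw [heq0]
      unfold wcost
      rcases max_choice ((idx.length : Int) - ((i0 : Int) - j0 + 1)) (wz idx i0 j0) with h | h <;> rw [h]
      · omega
      · have := gap hs hji0 hi0
        unfold wz
        omega
    have hPm : vB ≤ (idx.length : Int) - 1 := by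
      have := hle (idx.length - 1) (idx.length - 1) le_rfl (by omega)
      rw [wcost_self hm] at this
      exact this
    have hchar : ∀ c : Int, 0 ≤ c → c ≤ (idx.length : Int) - 1 →
        (pvIsOk idx c = true ↔ vB ≤ c) := by
      intro c h0 h1
      rw [isOk_iff hs h0 h1]
      constructor
      · rintro ⟨i, j, hji, hi, hc⟩
        exact le_trans (hle i j hji hi) hc
      · intro h
        exact ⟨i0, j0, hji0, hi0, by omega⟩
    exact pvBS_eq hchar hP0 hPm (idx.length + 1) 0 (idx.length : Int) (-1)
      (by omega) (by omega) hP0 (by omega) (Or.inl (by omega))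

-- ===== VERDICT (by name: the statement is the Claim_ definition above) =====
theorem solve_binsearch_spec : Claim_equal_solve_binsearch := by
  intro S _
  exact main_eq S
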